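-- pv_equiv track=rewrite | github.com/thanhdath/grast-sql | data_processing/spider2.0/spider_2_2_extract_table_columns_from_sql.py | normalize_columns_case
-- ===== SOURCE A (Python) =====
-- from typing import List, Dict, Any, Optional, Tuple
--
-- def normalize_columns_case(used_cols: List[str], schema: List[str]) -> List[str]:
--     """
--     Normalize the case of used_columns to match the schema case.
--     Do NOT exclude any columns - only normalize case.
--
--     Args:
--         used_cols: List of columns extracted by AI
--         schema: List of actual schema columns
--
--     Returns:
--         List of columns with normalized case to match schema
--     """
--     normalized_cols = []
--     schema_lower_to_original = {col.lower(): col for col in schema}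
--
--     for col in used_cols:
--         col_lower = col.lower()
--
--         # Check for exact match first (case-insensitive) and use schema case
--         if col_lower in schema_lower_to_original:
--             normalized_cols.append(schema_lower_to_original[col_lower])
--         else:
--             # Keep original if not found in schema
--             normalized_cols.append(col)
--
--     return normalized_cols
-- ===== SOURCE B (Python) =====
-- def normalize_columns_case(used_cols, schema):
--     """Inverted index: lowercase column -> output positions; then walk the schema in
--     reverse, writing each not-yet-seen lowercase name's bucket once (first hit in
--     reverse = last match, matching dict build order)."""
--     result = list(used_cols)
--     want = {}
--     for i, col in enumerate(used_cols):
--         want.setdefault(col.lower(), []).append(i)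
--     seen = set()
--     for s in reversed(schema):
--         low = s.lower()
--         if low not in seen:
--             seen.add(low)
--             for i in want.get(low, []):
--                 result[i] = s
--     return result
-- ===== Notes on version B (the rewrite author's own statement) =====
-- stated objective: alternative
-- what changed: Replaces A's lowercase->original schema dict and per-column lookups with an inverted index from lowercase column to output positions plus a reverse walk over the schema with a seen-set, writing each bucket once (first hit in reverse = last match, so dict overwrite semantics are preserved).
import Mathlib
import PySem

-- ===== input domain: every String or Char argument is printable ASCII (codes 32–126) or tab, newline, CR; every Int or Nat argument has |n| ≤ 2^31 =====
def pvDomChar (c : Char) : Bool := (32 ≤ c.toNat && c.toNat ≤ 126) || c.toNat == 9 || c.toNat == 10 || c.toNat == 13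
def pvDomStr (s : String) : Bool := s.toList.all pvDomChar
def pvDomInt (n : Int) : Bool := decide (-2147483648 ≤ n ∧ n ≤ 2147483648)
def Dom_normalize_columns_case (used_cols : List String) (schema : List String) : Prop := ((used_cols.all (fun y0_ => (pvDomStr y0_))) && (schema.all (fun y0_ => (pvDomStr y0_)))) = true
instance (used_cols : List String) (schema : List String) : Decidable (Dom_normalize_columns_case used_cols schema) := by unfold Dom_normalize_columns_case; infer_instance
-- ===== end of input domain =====

-- B replaces A's lowercase->original schema dict with an inverted index from lowercased column to
-- output positions plus a reverse walk over the schema with a seen-set (alternative decomposition, similar cost).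


-- ===== PORT A =====
def normalize_columns_case (used_cols : List String) (schema : List String) : List String :=
  let schema_lower_to_original : PySem.Dict String String :=
    schema.foldl (fun d col => d.insert (PySem.Str.lower col) col) PySem.Dict.empty
  used_cols.foldl (fun acc col =>
    let col_lower := PySem.Str.lower col
    match schema_lower_to_original.get? col_lower with
    | some v => acc ++ [v]
    | none => acc ++ [col]) []

-- ===== PORT B =====
def normalize_columns_case_alt (used_cols : List String) (schema : List String) : List String :=
  let want : PySem.Dict String (List Int) :=
    (PySem.List.enumerate used_cols 0).foldl
      (fun d p => d.insert (PySem.Str.lower p.2) (d.getD (PySem.Str.lower p.2) [] ++ [p.1]))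
      PySem.Dict.empty
  (schema.reverse.foldl
    (fun st s =>
      if st.2.contains (PySem.Str.lower s) then st
      else ((want.getD (PySem.Str.lower s) []).foldl (fun r i => PySem.List.pySetD r i s) st.1,
            st.2.add (PySem.Str.lower s)))
    (used_cols, PySem.Set.empty)).1

-- ===== PRECONDITION & SPEC =====
def Spec_normalize_columns_case (used_cols : List String) (schema : List String) (out : List String) : Prop := out = normalize_columns_case_alt used_cols schema
instance (used_cols : List String) (schema : List String) (out : List String) : Decidable (Spec_normalize_columns_case used_cols schema out) := by unfold Spec_normalize_columns_case; infer_instance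

-- ===== CLAIM (what is proved, stated in full; the proofs are below) =====
def Claim_equal_normalize_columns_case : Prop := ∀ (used_cols : List String) (schema : List String), Dom_normalize_columns_case used_cols schema → Spec_normalize_columns_case used_cols schema (normalize_columns_case used_cols schema)

-- ===== LEMMAS AND PROOFS =====

-- the last schema entry whose lowercase equals cl, with fallback fb
def pvScan (cl fb : String) (schema : List String) : String :=
  schema.foldl (fun best s => if PySem.Str.lower s == cl then s else best) fb

-- A-side: dict lookup with fallback = last-match scan
theorem pv_lookup_eq_scan (schema : List String) (d : PySem.Dict String String)
    (cl fb : String) :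
    (match (schema.foldl (fun d col => d.insert (PySem.Str.lower col) col) d).get? cl with
      | some v => v | none => fb)
    = schema.foldl (fun best s => if PySem.Str.lower s == cl then s else best)
        (match d.get? cl with | some v => v | none => fb) := by
  induction schema generalizing d with
  | nil => rfl
  | cons s rest ih =>
      simp only [List.foldl_cons]
      rw [ih]
      by_cases h : cl = PySem.Str.lower s
      · subst h
        simp [PySem.Dict.get?_insert_self]
      · rw [PySem.Dict.get?_insert_of_ne _ _ h]
        simp [beq_iff_eq, Ne.symm h]

-- A equals the per-column scan map
theorem pv_A_eq_map (used_cols schema : List String) (acc : List String) :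
    used_cols.foldl (fun acc col =>
      match (schema.foldl (fun d c => d.insert (PySem.Str.lower c) c) PySem.Dict.empty).get? (PySem.Str.lower col) with
      | some v => acc ++ [v]
      | none => acc ++ [col]) acc
    = acc ++ used_cols.map (fun col => pvScan (PySem.Str.lower col) col schema) := by
  induction used_cols generalizing acc with
  | nil => simp
  | cons c rest ih =>
      simp only [List.foldl_cons, List.map_cons]
      have h := pv_lookup_eq_scan schema PySem.Dict.empty (PySem.Str.lower c) c
      have hd : (PySem.Dict.empty : PySem.Dict String String).get? (PySem.Str.lower c) = none := rfl
      rw [hd] at h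
      rcases hm : (schema.foldl (fun d col => d.insert (PySem.Str.lower col) col) PySem.Dict.empty).get? (PySem.Str.lower c) with _ | v
      · simp only [hm] at h ⊢
        rw [ih]
        simp only [pvScan, ← h]
        simp
      · simp only [hm] at h ⊢
        rw [ih]
        simp only [pvScan, ← h]
        simp

-- characterization of the inverted index built from an enumerated list
theorem pv_want_getD (l : List (Int × String)) (d : PySem.Dict String (List Int)) (cl : String) :
    (l.foldl (fun d p => d.insert (PySem.Str.lower p.2) (d.getD (PySem.Str.lower p.2) [] ++ [p.1])) d).getD cl []
    = d.getD cl [] ++ (l.filter (fun p => PySem.Str.lower p.2 == cl)).map (·.1) := by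
  induction l generalizing d with
  | nil => simp
  | cons p rest ih =>
      simp only [List.foldl_cons, List.filter_cons]
      rw [ih]
      by_cases h : PySem.Str.lower p.2 == cl
      · have h' : cl = PySem.Str.lower p.2 := (eq_of_beq h).symm
        rw [PySem.Dict.getD_insert, if_pos h', h']
        simp [List.append_assoc]
      · simp only [beq_iff_eq] at h
        rw [PySem.Dict.getD_insert, if_neg (fun hc => h hc.symm)]
        simp [h]

-- proof-side name for B's inverted index
def pvWant (used_cols : List String) : PySem.Dict String (List Int) :=
  (PySem.List.enumerate used_cols 0).foldl
    (fun d p => d.insert (PySem.Str.lower p.2) (d.getD (PySem.Str.lower p.2) [] ++ [p.1]))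
    PySem.Dict.empty

-- membership in the index = position with matching lowercase
theorem pv_mem_want (used_cols : List String) (cl : String) (i : Int) :
    i ∈ (pvWant used_cols).getD cl []
    ↔ ∃ (k : Nat) (h : k < used_cols.length), i = (k : Int) ∧ PySem.Str.lower used_cols[k] = cl := by
  rw [pvWant, pv_want_getD]
  simp only [PySem.Dict.getD_empty, List.nil_append, List.mem_map, List.mem_filter,
    PySem.List.mem_enumerate_iff]
  constructor
  · rintro ⟨p, ⟨⟨k, hk, rfl⟩, hmatch⟩, rfl⟩
    exact ⟨k, hk, by simp, by simpa using hmatch⟩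
  · rintro ⟨k, hk, rfl, hmatch⟩
    exact ⟨((k : Int), used_cols[k]), ⟨⟨k, hk, by simp⟩, by simpa using hmatch⟩, rfl⟩

-- the inner writing loop preserves length
theorem pv_inner_length (s : String) (is : List Int) (res : List String) :
    (is.foldl (fun r i => PySem.List.pySetD r i s) res).length = res.length := by
  induction is generalizing res with
  | nil => rfl
  | cons i rest ih => simp [List.foldl_cons, ih, PySem.List.length_pySetD]

-- the inner writing loop, pointwise
theorem pv_inner_getElem? (s : String) (is : List Int) (res : List String) (j : Nat)
    (hnat : ∀ i ∈ is, ∃ k : Nat, i = (k : Int)) :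
    (is.foldl (fun r i => PySem.List.pySetD r i s) res)[j]?
    = if (j : Int) ∈ is ∧ j < res.length then some s else res[j]? := by
  induction is generalizing res with
  | nil => simp
  | cons i rest ih =>
      obtain ⟨k, rfl⟩ := hnat i (by simp)
      simp only [List.foldl_cons, PySem.List.pySetD_natCast]
      by_cases hj : j < res.length
      · rw [ih _ (fun i hi => hnat i (by simp [hi]))]
        simp only [List.length_set, List.getElem?_set, List.mem_cons]
        by_cases hmem : (j : Int) ∈ rest
        · simp [hj, hmem]
        · by_cases hik : k = j
          · subst hik
            simp [hj, hmem]
          · have hne : ((j : Int)) ≠ ((k : Int)) := by exact_mod_cast Ne.symm hik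
            simp [hj, hmem, hik, hne]
      · have hnone : res[j]? = none := by rw [List.getElem?_eq_none_iff]; omega
        have hlen := pv_inner_length s rest (res.set k s)
        rw [List.getElem?_eq_none_iff.mpr (by rw [hlen, List.length_set]; omega),
            if_neg (fun hc => hj hc.2), hnone]

-- keep-last scan = first match in the reversed list
theorem pv_scan_eq_find (schema : List String) (cl fb : String) :
    pvScan cl fb schema
    = (schema.reverse.find? (fun s => PySem.Str.lower s == cl)).getD fb := by
  induction schema generalizing fb with
  | nil => rfl
  | cons s xs ih =>
      simp only [pvScan, List.foldl_cons, List.reverse_cons]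
      rw [show (List.foldl (fun best s => if PySem.Str.lower s == cl then s else best)
            (if PySem.Str.lower s == cl then s else fb) xs)
          = pvScan cl (if PySem.Str.lower s == cl then s else fb) xs from rfl, ih]
      rw [List.find?_append]
      cases hfd : xs.reverse.find? (fun s => PySem.Str.lower s == cl) with
      | some v => simp
      | none =>
          simp only [Option.none_or]
          by_cases hp : (PySem.Str.lower s == cl) = true
          · simp [List.find?, hp]
          · simp [List.find?, hp]

-- B's reverse pass with a seen-set, pointwise
theorem pv_outerB (used_cols : List String) (l : List String) (res : List String)
    (seen : PySem.Set String) (j : Nat) (c fb : String)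
    (hj : used_cols[j]? = some c) (hr : res[j]? = some fb) :
    ((l.foldl
      (fun st s =>
        if st.2.contains (PySem.Str.lower s) then st
        else (((pvWant used_cols).getD (PySem.Str.lower s) []).foldl
                (fun r i => PySem.List.pySetD r i s) st.1,
              st.2.add (PySem.Str.lower s)))
      (res, seen)).1)[j]?
    = some (if PySem.Str.lower c ∈ seen then fb
            else (l.find? (fun s => PySem.Str.lower s == PySem.Str.lower c)).getD fb) := by
  obtain ⟨hjn, hjval⟩ := List.getElem?_eq_some_iff.mp hj
  induction l generalizing res seen fb with
  | nil => simp [hr]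
  | cons s rest ih =>
      simp only [List.foldl_cons]
      obtain ⟨hjlt, -⟩ := List.getElem?_eq_some_iff.mp hr
      by_cases hs : PySem.Str.lower s ∈ seen
      · rw [if_pos ((PySem.Set.contains_iff _ _).mpr hs), ih res seen fb hr]
        by_cases hc : PySem.Str.lower c ∈ seen
        · rw [if_pos hc, if_pos hc]
        · have hne : (PySem.Str.lower s == PySem.Str.lower c) = false :=
            beq_eq_false_iff_ne.mpr (fun h => hc (h ▸ hs))
          rw [if_neg hc, if_neg hc, List.find?_cons_of_neg (by simp [hne])]
      · rw [if_neg (fun hcon => hs ((PySem.Set.contains_iff _ _).mp hcon))]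
        have hnat : ∀ i ∈ ((pvWant used_cols).getD (PySem.Str.lower s) []),
            ∃ k : Nat, i = (k : Int) := by
          intro i hi
          obtain ⟨k, _, rfl, _⟩ := (pv_mem_want used_cols (PySem.Str.lower s) i).mp hi
          exact ⟨k, rfl⟩
        have hres' := pv_inner_getElem? s ((pvWant used_cols).getD (PySem.Str.lower s) []) res j hnat
        by_cases hcs : PySem.Str.lower c = PySem.Str.lower s
        · have hmem : (j : Int) ∈ (pvWant used_cols).getD (PySem.Str.lower s) [] := by
            rw [pv_mem_want]
            exact ⟨j, hjn, rfl, by rw [hjval, hcs]⟩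
          have h1 : (((pvWant used_cols).getD (PySem.Str.lower s) []).foldl
              (fun r i => PySem.List.pySetD r i s) res)[j]? = some s := by
            rw [hres']; simp [hmem, hjlt]
          rw [ih _ _ s h1]
          rw [if_pos ((PySem.Set.mem_add _ _ _).mpr (Or.inr hcs))]
          rw [if_neg (fun hc' => hs (hcs ▸ hc'))]
          rw [List.find?_cons_of_pos (by simp [hcs])]
          rfl
        · have hnomem : (j : Int) ∉ (pvWant used_cols).getD (PySem.Str.lower s) [] := by
            rw [pv_mem_want]
            rintro ⟨k, hk, hkj, hlow⟩
            have hkjeq : k = j := by exact_mod_cast hkj.symm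
            subst hkjeq
            rw [hjval] at hlow
            exact hcs hlow
          have h1 : (((pvWant used_cols).getD (PySem.Str.lower s) []).foldl
              (fun r i => PySem.List.pySetD r i s) res)[j]? = some fb := by
            rw [hres']; simp [hnomem, hr]
          rw [ih _ _ fb h1]
          have hiff : PySem.Str.lower c ∈ seen.add (PySem.Str.lower s) ↔ PySem.Str.lower c ∈ seen := by
            rw [PySem.Set.mem_add]
            constructor
            · rintro (h | h)
              · exact h
              · exact absurd h hcs
            · exact Or.inl
          have hne : (PySem.Str.lower s == PySem.Str.lower c) = false :=
            beq_eq_false_iff_ne.mpr (fun h => hcs h.symm)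
          by_cases hc : PySem.Str.lower c ∈ seen
          · rw [if_pos (hiff.mpr hc), if_pos hc]
          · rw [if_neg (fun h => hc (hiff.mp h)), if_neg hc,
                List.find?_cons_of_neg (by simp [hne])]

-- B's pass preserves length
theorem pv_outerB_length (used_cols : List String) (l : List String) (res : List String)
    (seen : PySem.Set String) :
    ((l.foldl
      (fun st s =>
        if st.2.contains (PySem.Str.lower s) then st
        else (((pvWant used_cols).getD (PySem.Str.lower s) []).foldl
                (fun r i => PySem.List.pySetD r i s) st.1,
              st.2.add (PySem.Str.lower s)))
      (res, seen)).1).length = res.length := by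
  induction l generalizing res seen with
  | nil => rfl
  | cons s rest ih =>
      simp only [List.foldl_cons]
      by_cases hs : seen.contains (PySem.Str.lower s)
      · rw [if_pos hs]; exact ih res seen
      · rw [if_neg hs]
        rw [ih _ _]
        exact pv_inner_length s _ res

-- B equals the per-column scan map
theorem pv_B_eq_map (used_cols schema : List String) :
    normalize_columns_case_alt used_cols schema
    = used_cols.map (fun col => pvScan (PySem.Str.lower col) col schema) := by
  apply List.ext_getElem?
  intro j
  by_cases hj : j < used_cols.length
  · have hget : used_cols[j]? = some used_cols[j] := List.getElem?_eq_some_iff.mpr ⟨hj, rfl⟩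
    have h : (normalize_columns_case_alt used_cols schema)[j]?
        = some (if PySem.Str.lower used_cols[j] ∈ (PySem.Set.empty : PySem.Set String) then used_cols[j]
                else (schema.reverse.find? (fun s => PySem.Str.lower s == PySem.Str.lower used_cols[j])).getD used_cols[j]) :=
      pv_outerB used_cols schema.reverse used_cols PySem.Set.empty j used_cols[j] used_cols[j] hget hget
    rw [h, if_neg (by simp [PySem.Set.empty]), List.getElem?_map, hget]
    simp only [Option.map_some]
    rw [pv_scan_eq_find]
  · have h1 : (normalize_columns_case_alt used_cols schema).length = used_cols.length :=
      pv_outerB_length used_cols schema.reverse used_cols PySem.Set.empty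
    rw [List.getElem?_eq_none_iff.mpr (by omega),
        List.getElem?_eq_none_iff.mpr (by simp; omega)]

-- ===== VERDICT (by name: the statement is the Claim_ definition above) =====
theorem normalize_columns_case_spec : Claim_equal_normalize_columns_case := by
  intro used_cols schema _
  unfold Spec_normalize_columns_case normalize_columns_case
  rw [pv_B_eq_map]
  exact pv_A_eq_map used_cols schema []
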